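-- pv_equiv track=rewrite | github.com/capivara-vibe/claw-docs-kb | scrape_docs.py | trim_changelog
-- ===== SOURCE A (Python) =====
-- def trim_changelog(text: str, max_releases: int) -> str:
--     """Keep only the first *max_releases* versioned release sections."""
--     lines = text.splitlines(keepends=True)
--     kept: list[str] = []
--     release_count = 0
--     for line in lines:
--         # Each release starts with '## <version>' (not '## Unreleased')
--         if line.startswith("## ") and not line.strip().endswith("Unreleased"):
--             release_count += 1
--             if release_count > max_releases:
--                 break
--         kept.append(line)
--     return "".join(kept)
-- ===== SOURCE B (Python) =====
-- def trim_changelog(text: str, max_releases: int) -> str: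
--     """Keep only the first *max_releases* versioned release sections."""
--     lines = text.splitlines(keepends=True)
--     headers = [i for i, line in enumerate(lines)
--                if line.startswith("## ") and not line.strip().endswith("Unreleased")]
--     m = max(max_releases, 0)
--     if m < len(headers):
--         lines = lines[:headers[m]]
--     return "".join(lines)
-- ===== Notes on version B (the rewrite author's own statement) =====
-- stated objective: alternative
-- what changed: Replaces A's single interleaved append/count/break loop with an index-then-slice decomposition: collect all release-header line indices with one comprehension, clamp max_releases to 0 and cut the line list once at headers[m] (or keep all), then join.
import Mathlib
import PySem

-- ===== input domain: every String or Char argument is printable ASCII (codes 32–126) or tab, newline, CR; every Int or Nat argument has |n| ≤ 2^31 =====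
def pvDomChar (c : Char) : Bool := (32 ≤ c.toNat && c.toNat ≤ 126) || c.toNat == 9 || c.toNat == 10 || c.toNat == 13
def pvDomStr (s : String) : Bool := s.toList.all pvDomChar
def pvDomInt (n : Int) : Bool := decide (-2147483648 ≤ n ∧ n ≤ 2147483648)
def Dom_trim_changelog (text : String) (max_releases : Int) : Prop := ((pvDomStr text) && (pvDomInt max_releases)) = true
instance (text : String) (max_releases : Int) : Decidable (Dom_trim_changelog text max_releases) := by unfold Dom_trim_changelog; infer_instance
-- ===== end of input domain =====

-- B replaces A's interleaved append/count/break loop by an index-then-slice decomposition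
-- (collect header positions, compute one cut index, slice once); objective: alternative, same cost.

-- ===== PORT A =====
-- text.splitlines(keepends=True), ported by hand; exact on Dom's charset (printable ASCII + tab/NL/CR:
-- the only Python line breaks occurring there are '\n', '\r', '\r\n').
def pvSplitKeep : List Char → List Char → List (List Char)
  | [], acc => if acc = [] then [] else [acc.reverse]
  | '\r' :: '\n' :: rest, acc => (acc.reverse ++ ['\r', '\n']) :: pvSplitKeep rest []
  | c :: rest, acc =>
    if c = '\n' ∨ c = '\r' then (acc.reverse ++ [c]) :: pvSplitKeep rest []
    else pvSplitKeep rest (c :: acc)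

-- line.startswith("## ") and not line.strip().endswith("Unreleased")
def pvIsHeader (line : List Char) : Bool :=
  PySem.Chars.startswith line "## ".toList &&
    !(PySem.Chars.endswith (PySem.Chars.strip line) "Unreleased".toList)

-- the for-loop of A: result built structurally, release_count threaded as `count`
def pvLoopA (maxr : Int) : List (List Char) → Int → List (List Char)
  | [], _ => []
  | line :: rest, count =>
    if pvIsHeader line then
      if count + 1 > maxr then []
      else line :: pvLoopA maxr rest (count + 1)
    else line :: pvLoopA maxr rest count

def trim_changelog (text : String) (max_releases : Int) : String :=
  String.ofList (PySem.Chars.join [] (pvLoopA max_releases (pvSplitKeep text.toList []) 0))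

-- ===== PORT B =====
-- B's comprehension: header indices of `lines`, enumerated from start `s`
def pvHeaders (s : Int) (lines : List (List Char)) : List Int :=
  (PySem.List.enumerate lines s).filterMap (fun p => if pvIsHeader p.2 then some p.1 else none)

def trim_changelog_alt (text : String) (max_releases : Int) : String :=
  let lines := pvSplitKeep text.toList []
  let headers := pvHeaders 0 lines
  let m := max max_releases 0
  let lines2 :=
    if m < (headers.length : Int) then
      PySem.List.slice lines none (some (PySem.List.pyGetD headers m 0))
    else lines
  String.ofList (PySem.Chars.join [] lines2)

-- ===== PRECONDITION & SPEC =====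
def Spec_trim_changelog (text : String) (max_releases : Int) (out : String) : Prop := out = trim_changelog_alt text max_releases
instance (text : String) (max_releases : Int) (out : String) : Decidable (Spec_trim_changelog text max_releases out) := by unfold Spec_trim_changelog; infer_instance

-- ===== CLAIM (what is proved, stated in full; the proofs are below) =====
def Claim_equal_trim_changelog : Prop := ∀ (text : String) (max_releases : Int), Dom_trim_changelog text max_releases → Spec_trim_changelog text max_releases (trim_changelog text max_releases)

-- ===== LEMMAS AND PROOFS =====

theorem pvHeaders_nil (s : Int) : pvHeaders s [] = [] := by
  simp [pvHeaders, PySem.List.enumerate_nil]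

theorem pvHeaders_cons (s : Int) (l : List Char) (rest : List (List Char)) :
    pvHeaders s (l :: rest) =
      if pvIsHeader l then s :: pvHeaders (s + 1) rest else pvHeaders (s + 1) rest := by
  simp only [pvHeaders, PySem.List.enumerate_cons, List.filterMap_cons]
  split <;> simp_all

theorem pvHeaders_ge (s : Int) (lines : List (List Char)) :
    ∀ x ∈ pvHeaders s lines, s ≤ x := by
  induction lines generalizing s with
  | nil => simp [pvHeaders_nil]
  | cons l rest ih =>
    intro x hx
    rw [pvHeaders_cons] at hx
    split at hx
    · rcases List.mem_cons.mp hx with h | h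
      · omega
      · have := ih (s + 1) x h; omega
    · have := ih (s + 1) x hx; omega

theorem pvGetD_cons_pos {α : Type} (x : α) (xs : List α) (i : Int) (d : α)
    (h : 0 < i) : PySem.List.pyGetD (x :: xs) i d = PySem.List.pyGetD xs (i - 1) d := by
  simp only [PySem.List.pyGetD, PySem.List.pyGet?, PySem.List.pyIdx?, List.length_cons]
  have h0 : (0:Int) ≤ i := le_of_lt h
  have h0' : (0:Int) ≤ i - 1 := by omega
  rw [if_pos h0, if_pos h0']
  by_cases hlt : i - 1 < (xs.length : Int)
  · rw [if_pos (by push_cast; omega), if_pos hlt]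
    have hti : i.toNat = (i - 1).toNat + 1 := by omega
    rw [hti]
    simp
  · rw [if_neg (by push_cast; omega), if_neg hlt]
    simp

-- A's loop cuts exactly at the header with index  max (maxr - count) 0  in B's header list
theorem pvLoopA_eq_cut (maxr : Int) (lines : List (List Char)) :
    ∀ (c s : Int),
      pvLoopA maxr lines c =
        (if max (maxr - c) 0 < ((pvHeaders s lines).length : Int) then
          lines.take ((PySem.List.pyGetD (pvHeaders s lines) (max (maxr - c) 0) 0) - s).toNat
        else lines) := by
  induction lines with
  | nil =>
    intro c s
    rw [if_neg (by simp [pvHeaders_nil])]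
    rfl
  | cons l rest ih =>
    intro c s
    have hstep : pvLoopA maxr (l :: rest) c =
        (if pvIsHeader l then
          (if c + 1 > maxr then [] else l :: pvLoopA maxr rest (c + 1))
        else l :: pvLoopA maxr rest c) := rfl
    rw [hstep, pvHeaders_cons]
    by_cases hH : pvIsHeader l
    · rw [if_pos hH, if_pos hH]
      by_cases hb : c + 1 > maxr
      · have hm : max (maxr - c) 0 = 0 := by omega
        rw [if_pos hb, hm, if_pos (by simp), PySem.List.pyGetD_zero_cons]
        simp
      · have hm1 : (1:Int) ≤ max (maxr - c) 0 := by omega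
        have hms : max (maxr - (c + 1)) 0 = max (maxr - c) 0 - 1 := by omega
        rw [if_neg hb, ih (c + 1) (s + 1), hms]
        by_cases hlt : max (maxr - c) 0 - 1 < ((pvHeaders (s + 1) rest).length : Int)
        · rw [if_pos hlt, if_pos (by simp; omega)]
          rw [pvGetD_cons_pos _ _ _ _ (by omega)]
          set g := PySem.List.pyGetD (pvHeaders (s + 1) rest) (max (maxr - c) 0 - 1) 0 with hg
          have hgmem : g ∈ pvHeaders (s + 1) rest := by
            apply PySem.List.pyGetD_mem
            constructor <;> omega
          have hgs : s + 1 ≤ g := pvHeaders_ge (s + 1) rest g hgmem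
          have hsucc : (g - s).toNat = (g - (s + 1)).toNat + 1 := by omega
          rw [hsucc, List.take_succ_cons]
        · rw [if_neg hlt, if_neg (by simp; omega)]
    · rw [if_neg hH, if_neg hH, ih c (s + 1)]
      by_cases hlt : max (maxr - c) 0 < ((pvHeaders (s + 1) rest).length : Int)
      · rw [if_pos hlt, if_pos hlt]
        set g := PySem.List.pyGetD (pvHeaders (s + 1) rest) (max (maxr - c) 0) 0 with hg
        have hgmem : g ∈ pvHeaders (s + 1) rest := by
          apply PySem.List.pyGetD_mem
          constructor <;> omega
        have hgs : s + 1 ≤ g := pvHeaders_ge (s + 1) rest g hgmem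
        have hsucc : (g - s).toNat = (g - (s + 1)).toNat + 1 := by omega
        rw [hsucc, List.take_succ_cons]
      · rw [if_neg hlt, if_neg hlt]

-- ===== VERDICT (by name: the statement is the Claim_ definition above) =====
theorem trim_changelog_spec : Claim_equal_trim_changelog := by
  intro text maxr _
  show trim_changelog text maxr = trim_changelog_alt text maxr
  unfold trim_changelog trim_changelog_alt
  set lines := pvSplitKeep text.toList [] with hlines
  have hmax : max (maxr - 0) 0 = max maxr 0 := by omega
  rw [pvLoopA_eq_cut maxr lines 0 0, hmax]
  by_cases hlt : max maxr 0 < ((pvHeaders 0 lines).length : Int)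
  · rw [if_pos hlt]
    simp only [if_pos hlt]
    set g := PySem.List.pyGetD (pvHeaders 0 lines) (max maxr 0) 0 with hg
    have hgmem : g ∈ pvHeaders 0 lines := by
      apply PySem.List.pyGetD_mem
      constructor <;> omega
    have hgs : (0:Int) ≤ g := pvHeaders_ge 0 lines g hgmem
    rw [PySem.List.slice_to _ hgs]
    simp
  · rw [if_neg hlt]
    simp only [if_neg hlt]
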